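-- pv_equiv track=rewrite | github.com/RajuSakshena/c40-jobs-scraper | c40.py | extract_how_to_apply
-- ===== SOURCE A (Python) =====
-- custom_keywords = [
--     "Selection Criteria", "Evaluation & Follow-Up", "Application Guidelines", "Eligible Applicants:",
--     "Scope of Work:", "Proposal Requirements", "Evaluation Criteria", "Submission Details", "Eligible Entities",
--     "How to apply", "Purpose of RFP", "Proposal Guidelines", "Eligibility Criteria", "Application must include:",
--     "Eligibility", "Submission of Tender:", "Technical Bid-", "Who Can Apply", "Documents Required", "Expectation:",
--     "Eligibility Criterion:", "Submission terms:", "Vendor Qualifications", "To apply",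
--     "To know about the eligibility criteria:", "The agency's specific responsibilities include –",
--     "SELCO Foundation will be responsible for:", "Partner Eligibility Criteria", "Proposal Submission Requirements",
--     "Proposal Evaluation Criteria", "Eligibility Criteria for CSOs to be part of the programme:", "Pre-Bid Queries:",
--     "Response to Pre-Bid Queries:", "Submission of Bid:", "Applicant Profiles:", "What we like to see in grant applications:",
--     "Research that is supported by the SVRI must:", "Successful projects are most often:", "Criteria for funding:",
--     "Before you begin to write your proposal, consider that IEF prefers to fund:",
--     "As you prepare your budget, these are some items that IEF will not fund:", "Organizational Profile",
--     "Selection Process", "Proposal Submission Guidelines", "Terms and Conditions", "Security Deposit:",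
--     "Facilities and Support Offered under the call for proposal:", "Other Requirements:", "Reporting To:",
--     "Prospective Consultants should demonstrate:", "Term:", "Location:", "Salary:", "Application Process:",
--     "Person Specification:", "Position Description:", "Responsibilities:", "Required qualifications:",
--     "Modeling, coding, and quantitative tool maintenance", "Specific responsibilities include:"
-- ]
--
-- def extract_how_to_apply(description):
--     """Extract keyword sections with their paragraphs (headings + content)."""
--     if not description or not isinstance(description, str):
--         return "N/A"
--
--     norm_keywords = [kw.lower().rstrip(":") for kw in custom_keywords]
--     matched_sections = []
--
--     # Split into lines
--     segments = description.split("\n")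
--     i = 0
--     while i < len(segments):
--         seg_clean = segments[i].strip()
--         if not seg_clean:
--             i += 1
--             continue
--         seg_lower = seg_clean.lower()
--
--         # If line starts with keyword
--         if any(seg_lower.startswith(kw) for kw in norm_keywords):
--             section_lines = [f"• {seg_clean}"]
--             i += 1
--             # Capture following lines until next keyword or empty line
--             while i < len(segments):
--                 next_line = segments[i].strip()
--                 if not next_line:
--                     break
--                 next_lower = next_line.lower()
--                 if any(next_lower.startswith(kw) for kw in norm_keywords):
--                     break
--                 section_lines.append(next_line)
--                 i += 1
--             matched_sections.append("\n".join(section_lines))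
--         else:
--             i += 1
--
--     return "\n\n".join(matched_sections) if matched_sections else "N/A"
-- ===== SOURCE B (Python) =====
-- custom_keywords = [
--     "Selection Criteria", "Evaluation & Follow-Up", "Application Guidelines", "Eligible Applicants:",
--     "Scope of Work:", "Proposal Requirements", "Evaluation Criteria", "Submission Details", "Eligible Entities",
--     "How to apply", "Purpose of RFP", "Proposal Guidelines", "Eligibility Criteria", "Application must include:",
--     "Eligibility", "Submission of Tender:", "Technical Bid-", "Who Can Apply", "Documents Required", "Expectation:",
--     "Eligibility Criterion:", "Submission terms:", "Vendor Qualifications", "To apply",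
--     "To know about the eligibility criteria:", "The agency's specific responsibilities include –",
--     "SELCO Foundation will be responsible for:", "Partner Eligibility Criteria", "Proposal Submission Requirements",
--     "Proposal Evaluation Criteria", "Eligibility Criteria for CSOs to be part of the programme:", "Pre-Bid Queries:",
--     "Response to Pre-Bid Queries:", "Submission of Bid:", "Applicant Profiles:", "What we like to see in grant applications:",
--     "Research that is supported by the SVRI must:", "Successful projects are most often:", "Criteria for funding:",
--     "Before you begin to write your proposal, consider that IEF prefers to fund:",
--     "As you prepare your budget, these are some items that IEF will not fund:", "Organizational Profile",
--     "Selection Process", "Proposal Submission Guidelines", "Terms and Conditions", "Security Deposit:",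
--     "Facilities and Support Offered under the call for proposal:", "Other Requirements:", "Reporting To:",
--     "Prospective Consultants should demonstrate:", "Term:", "Location:", "Salary:", "Application Process:",
--     "Person Specification:", "Position Description:", "Responsibilities:", "Required qualifications:",
--     "Modeling, coding, and quantitative tool maintenance", "Specific responsibilities include:"
-- ]
--
-- _NORM_KEYWORDS = tuple(kw.lower().rstrip(":") for kw in custom_keywords)
--
--
-- def extract_how_to_apply(description):
--     """Extract keyword sections with their paragraphs (headings + content)."""
--     if not description or not isinstance(description, str):
--         return "N/A"
--
--     sections = []
--     current = None  # lines of the open section, or None when outside a section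
--     for raw in description.split("\n"):
--         line = raw.strip()
--         if not line:
--             if current is not None:
--                 sections.append("\n".join(current))
--                 current = None
--         elif any(line.lower().startswith(kw) for kw in _NORM_KEYWORDS):
--             if current is not None:
--                 sections.append("\n".join(current))
--             current = ["\u2022 " + line]
--         elif current is not None:
--             current.append(line)
--     if current is not None:
--         sections.append("\n".join(current))
--     return "\n\n".join(sections) if sections else "N/A"
-- ===== Notes on version B (the rewrite author's own statement) =====
-- stated objective: simpler
-- what changed: Replaced the index-driven nested while loops (outer scan plus inner capture loop re-testing each line) with a single flat for-loop over the split lines that maintains a current-section accumulator (None when outside a section) and flushes it on blank lines, new headings and end of input.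
import Mathlib
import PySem

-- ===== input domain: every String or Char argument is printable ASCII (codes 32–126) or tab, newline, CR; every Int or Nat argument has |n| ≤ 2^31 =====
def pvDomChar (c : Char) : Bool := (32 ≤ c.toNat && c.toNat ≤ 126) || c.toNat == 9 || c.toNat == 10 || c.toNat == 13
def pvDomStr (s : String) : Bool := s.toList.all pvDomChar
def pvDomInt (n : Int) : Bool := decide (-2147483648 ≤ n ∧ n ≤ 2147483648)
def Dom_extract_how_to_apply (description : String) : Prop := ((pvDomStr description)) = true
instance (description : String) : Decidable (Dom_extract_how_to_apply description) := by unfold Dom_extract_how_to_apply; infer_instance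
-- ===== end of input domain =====

-- B replaces A's nested index-driven while loops by one flat fold with a current-section
-- accumulator; objective: simpler (same asymptotic cost).

-- shared module constant (same list in both Python files)
def custom_keywords : List String := [
    "Selection Criteria", "Evaluation & Follow-Up", "Application Guidelines", "Eligible Applicants:",
    "Scope of Work:", "Proposal Requirements", "Evaluation Criteria", "Submission Details", "Eligible Entities",
    "How to apply", "Purpose of RFP", "Proposal Guidelines", "Eligibility Criteria", "Application must include:",
    "Eligibility", "Submission of Tender:", "Technical Bid-", "Who Can Apply", "Documents Required", "Expectation:",
    "Eligibility Criterion:", "Submission terms:", "Vendor Qualifications", "To apply",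
    "To know about the eligibility criteria:", "The agency's specific responsibilities include –",
    "SELCO Foundation will be responsible for:", "Partner Eligibility Criteria", "Proposal Submission Requirements",
    "Proposal Evaluation Criteria", "Eligibility Criteria for CSOs to be part of the programme:", "Pre-Bid Queries:",
    "Response to Pre-Bid Queries:", "Submission of Bid:", "Applicant Profiles:", "What we like to see in grant applications:",
    "Research that is supported by the SVRI must:", "Successful projects are most often:", "Criteria for funding:",
    "Before you begin to write your proposal, consider that IEF prefers to fund:",
    "As you prepare your budget, these are some items that IEF will not fund:", "Organizational Profile",
    "Selection Process", "Proposal Submission Guidelines", "Terms and Conditions", "Security Deposit:",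
    "Facilities and Support Offered under the call for proposal:", "Other Requirements:", "Reporting To:",
    "Prospective Consultants should demonstrate:", "Term:", "Location:", "Salary:", "Application Process:",
    "Person Specification:", "Position Description:", "Responsibilities:", "Required qualifications:",
    "Modeling, coding, and quantitative tool maintenance", "Specific responsibilities include:"]

-- exact port of Python's  s.rstrip(":")  (PySem has no rstrip-with-chars primitive):
-- drop trailing ':' characters
def pyRstripColon (s : String) : String :=
  String.ofList ((s.toList.reverse.dropWhile (· == ':')).reverse)

-- ===== PORT A =====
-- inner while loop of A: capture stripped lines until next keyword line or empty line;
-- returns (captured stripped lines, remaining segments incl. the breaking line)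
def aCapture (kws : List String) : List String → List String × List String
  | [] => ([], [])
  | s :: rest =>
    let nextLine := PySem.Str.strip s
    if nextLine = "" then ([], s :: rest)
    else if kws.any (fun kw => PySem.Str.startswith (PySem.Str.lower nextLine) kw) then ([], s :: rest)
    else
      let r := aCapture kws rest
      (nextLine :: r.1, r.2)

-- termination measure for the outer loop (i only advances)
theorem aCapture_len (kws : List String) (l : List String) :
    (aCapture kws l).2.length ≤ l.length := by
  induction l with
  | nil => simp [aCapture]
  | cons s rest ih =>
    simp only [aCapture]
    split
    · simp
    · split
      · simp
      · simpa using Nat.le_succ_of_le ih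

-- outer while loop of A
def aOuter (kws : List String) : List String → List String
  | [] => []
  | s :: rest =>
    let segClean := PySem.Str.strip s
    if segClean = "" then aOuter kws rest
    else if kws.any (fun kw => PySem.Str.startswith (PySem.Str.lower segClean) kw) then
      PySem.Str.join "\n" (("• " ++ segClean) :: (aCapture kws rest).1)
        :: aOuter kws (aCapture kws rest).2
    else aOuter kws rest
  termination_by l => l.length
  decreasing_by
  · simp
  · exact Nat.lt_succ_of_le (aCapture_len kws rest)
  · simp

def extract_how_to_apply (description : String) : String :=
  if description = "" then "N/A"    -- 'if not description or not isinstance(description, str)'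
  else
    let norm_keywords := custom_keywords.map (fun kw => pyRstripColon (PySem.Str.lower kw))
    let segments := (PySem.Str.split? description "\n").getD []   -- sep "\n" ≠ "" so split? = some
    let matched_sections := aOuter norm_keywords segments
    if matched_sections = [] then "N/A" else PySem.Str.join "\n\n" matched_sections

-- ===== PORT B =====
def NORM_KEYWORDS : List String :=
  custom_keywords.map (fun kw => pyRstripColon (PySem.Str.lower kw))

def isKw (line : String) : Bool :=
  NORM_KEYWORDS.any (fun kw => PySem.Str.startswith (PySem.Str.lower line) kw)

-- one step of B's flat loop; state = (finished sections, open section or none)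
def bStep (st : List String × Option (List String)) (raw : String) :
    List String × Option (List String) :=
  let line := PySem.Str.strip raw
  if line = "" then
    match st.2 with
    | some cur => (st.1 ++ [PySem.Str.join "\n" cur], none)
    | none => (st.1, none)
  else if isKw line then
    match st.2 with
    | some cur => (st.1 ++ [PySem.Str.join "\n" cur], some ["• " ++ line])
    | none => (st.1, some ["• " ++ line])
  else
    match st.2 with
    | some cur => (st.1, some (cur ++ [line]))
    | none => st

-- the post-loop flush of B
def bFinal (st : List String × Option (List String)) : List String :=
  match st.2 with
  | some cur => st.1 ++ [PySem.Str.join "\n" cur]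
  | none => st.1

def extract_how_to_apply_alt (description : String) : String :=
  if description = "" then "N/A"
  else
    let segs := (PySem.Str.split? description "\n").getD []
    let sections := bFinal (segs.foldl bStep ([], none))
    if sections = [] then "N/A" else PySem.Str.join "\n\n" sections

-- ===== PRECONDITION & SPEC =====
def Spec_extract_how_to_apply (description : String) (out : String) : Prop := out = extract_how_to_apply_alt description
instance (description : String) (out : String) : Decidable (Spec_extract_how_to_apply description out) := by unfold Spec_extract_how_to_apply; infer_instance

-- ===== CLAIM (what is proved, stated in full; the proofs are below) =====
def Claim_equal_extract_how_to_apply : Prop := ∀ (description : String), Dom_extract_how_to_apply description → Spec_extract_how_to_apply description (extract_how_to_apply description)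

-- ===== LEMMAS AND PROOFS =====

-- B's flat fold, flushed at the end, produces exactly A's section list:
-- proved simultaneously for the "inside a section" state (matching A's inner capture loop)
-- and the "outside" state (matching A's outer loop).
theorem bridge (l : List String) :
    (∀ secs cur, bFinal (l.foldl bStep (secs, some cur)) =
        secs ++ PySem.Str.join "\n" (cur ++ (aCapture NORM_KEYWORDS l).1)
          :: aOuter NORM_KEYWORDS (aCapture NORM_KEYWORDS l).2)
    ∧ (∀ secs, bFinal (l.foldl bStep (secs, none)) = secs ++ aOuter NORM_KEYWORDS l) := by
  induction l with
  | nil => constructor <;> intro secs <;> simp [bFinal, aCapture, aOuter]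
  | cons s rest ih =>
    have hcap : ∀ secs cur, bFinal (List.foldl bStep (secs, some cur) (s :: rest)) =
        secs ++ PySem.Str.join "\n" (cur ++ (aCapture NORM_KEYWORDS (s :: rest)).1)
          :: aOuter NORM_KEYWORDS (aCapture NORM_KEYWORDS (s :: rest)).2 := by
      intro secs cur
      by_cases he : PySem.Str.strip s = ""
      · rw [List.foldl_cons, show bStep (secs, some cur) s =
            (secs ++ [PySem.Str.join "\n" cur], none) by simp [bStep, he], ih.2]
        simp [aCapture, aOuter, he]
      · rcases hk : isKw (PySem.Str.strip s) with _ | _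
        · have hk' : ¬ ∃ x ∈ NORM_KEYWORDS,
              PySem.Chars.startswith (PySem.Chars.lower (PySem.Chars.strip s.toList)) x.toList = true := by
            simpa [isKw] using hk
          rw [List.foldl_cons, show bStep (secs, some cur) s =
              (secs, some (cur ++ [PySem.Str.strip s])) by simp [bStep, he, hk], ih.1]
          simp [aCapture, he, hk']
        · have hk' : ∃ x ∈ NORM_KEYWORDS,
              PySem.Chars.startswith (PySem.Chars.lower (PySem.Chars.strip s.toList)) x.toList = true := by
            simpa [isKw] using hk
          rw [List.foldl_cons, show bStep (secs, some cur) s =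
              (secs ++ [PySem.Str.join "\n" cur], some ["• " ++ PySem.Str.strip s])
              by simp [bStep, he, hk], ih.1]
          simp [aCapture, aOuter, he, hk']
    refine ⟨hcap, ?_⟩
    intro secs
    by_cases he : PySem.Str.strip s = ""
    · rw [List.foldl_cons, show bStep (secs, none) s = (secs, none) by simp [bStep, he], ih.2]
      simp [aOuter, he]
    · rcases hk : isKw (PySem.Str.strip s) with _ | _
      · have hk' : ¬ ∃ x ∈ NORM_KEYWORDS,
            PySem.Chars.startswith (PySem.Chars.lower (PySem.Chars.strip s.toList)) x.toList = true := by
          simpa [isKw] using hk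
        rw [List.foldl_cons, show bStep (secs, none) s = (secs, none) by simp [bStep, he, hk],
          ih.2]
        simp [aOuter, he, hk']
      · have hk' : ∃ x ∈ NORM_KEYWORDS,
            PySem.Chars.startswith (PySem.Chars.lower (PySem.Chars.strip s.toList)) x.toList = true := by
          simpa [isKw] using hk
        rw [List.foldl_cons, show bStep (secs, none) s =
            (secs, some ["• " ++ PySem.Str.strip s]) by simp [bStep, he, hk], ih.1]
        simp [aOuter, he, hk']

-- ===== VERDICT (by name: the statement is the Claim_ definition above) =====
theorem extract_how_to_apply_spec : Claim_equal_extract_how_to_apply := by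
  intro description _
  unfold Spec_extract_how_to_apply extract_how_to_apply extract_how_to_apply_alt
  by_cases h : description = ""
  · simp [h]
  · simp only [if_neg h]
    rw [(bridge _).2 []]
    rfl
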